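-- pv_equiv track=rewrite | github.com/pleielp/apss-py | chapter20/NAMING/taeyoung.py | get_prefix_suffix
-- ===== SOURCE A (Python) =====
-- def get_partial_match(N):
--     pi = [0] * len(N)
--     begin, matched = 1, 0
--     while begin + matched < len(N):
--         if N[begin+matched] == N[matched]:
--             matched += 1
--             pi[begin+matched-1] = matched
--         else:
--             if matched == 0:
--                 begin += 1
--             else:
--                 begin += matched - pi[matched-1]
--                 matched = pi[matched-1]
--
--     return pi
--
-- def get_prefix_suffix(s):
--     ret = list()
--     pi = get_partial_match(s)
--     k = len(s)
--
--     while k > 0: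
--         ret.append(k)
--         k = pi[k-1]
--
--     return ret
-- ===== SOURCE B (Python) =====
-- def get_prefix_suffix(s):
--     n = len(s)
--     return [k for k in range(n, 0, -1) if s[:k] == s[-k:]]
-- ===== Notes on version B (the rewrite author's own statement) =====
-- stated objective: simpler
-- what changed: B drops A's KMP failure-function table and chain walk entirely and instead tests each length k from n down to 1 directly with s[:k] == s[-k:], collecting the matches in one comprehension.
import Mathlib
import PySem

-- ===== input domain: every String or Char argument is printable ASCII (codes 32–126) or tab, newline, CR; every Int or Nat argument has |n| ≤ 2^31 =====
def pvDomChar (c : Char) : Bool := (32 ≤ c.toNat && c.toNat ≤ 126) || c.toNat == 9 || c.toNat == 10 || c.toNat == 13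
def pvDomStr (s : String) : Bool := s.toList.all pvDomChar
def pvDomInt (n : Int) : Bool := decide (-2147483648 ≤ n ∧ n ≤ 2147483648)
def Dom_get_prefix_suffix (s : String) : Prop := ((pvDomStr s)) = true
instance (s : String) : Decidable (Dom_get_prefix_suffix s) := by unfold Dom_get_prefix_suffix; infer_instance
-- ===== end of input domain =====

-- B replaces A's KMP failure-function machinery by directly testing each length k
-- (from n down to 1) with s[:k] == s[-k:]; objective: simpler (no speed claim).

-- ===== PORT A =====
-- A's get_partial_match while loop, state (pi, begin, matched).  pi holds the
-- (always nonnegative) Python ints as Nat.  The `if hp : p < m` guard only makes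
-- the recursion total: if pi[matched-1] ≥ matched the Python loop would not
-- terminate; pmatch_entry_le below shows that state is never reached.
def pmLoop (N : List Char) (pi : List Nat) (b m : Nat) : List Nat :=
  if _h : b + m < N.length then
    if N.getD (b + m) 'a' == N.getD m 'a' then
      pmLoop N (pi.set (b + m) (m + 1)) b (m + 1)
    else if m = 0 then
      pmLoop N pi (b + 1) 0
    else
      if _hp : pi.getD (m - 1) 0 < m then
        pmLoop N pi (b + (m - pi.getD (m - 1) 0)) (pi.getD (m - 1) 0)
      else pi
  else pi
termination_by (N.length - (b + m), m)
decreasing_by all_goals (simp_wf; simp only [List.getD] at *; omega)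

def get_partial_match (s : String) : List Nat :=
  pmLoop s.toList (List.replicate s.toList.length 0) 1 0

-- A's second while loop: k, pi[k-1], pi[pi[k-1]-1], …  (same totality guard)
def chainLoop (pi : List Nat) (k : Nat) : List Int :=
  if k > 0 then
    let p := pi.getD (k - 1) 0
    if _hp : p < k then (k : Int) :: chainLoop pi p else [(k : Int)]
  else []
termination_by k

def get_prefix_suffix (s : String) : List Int :=
  chainLoop (get_partial_match s) s.toList.length

-- ===== PORT B =====
-- Source B: [k for k in range(n, 0, -1) if s[:k] == s[-k:]]
def get_prefix_suffix_alt (s : String) : List Int :=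
  (PySem.List.pyRange (s.toList.length : Int) 0 (-1)).filter
    (fun k => PySem.List.slice s.toList none (some k) == PySem.List.slice s.toList (some (-k)) none)

-- ===== PRECONDITION & SPEC =====
def Spec_get_prefix_suffix (s : String) (out : List Int) : Prop := out = get_prefix_suffix_alt s
instance (s : String) (out : List Int) : Decidable (Spec_get_prefix_suffix s out) := by unfold Spec_get_prefix_suffix; infer_instance

-- ===== CLAIM (what is proved, stated in full; the proofs are below) =====
def Claim_equal_get_prefix_suffix : Prop := ∀ (s : String), Dom_get_prefix_suffix s → Spec_get_prefix_suffix s (get_prefix_suffix s)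

-- ===== LEMMAS AND PROOFS =====

-- char-level: N[:k] has a border of length ℓ (prefix of length ℓ = suffix of length ℓ)
def bordb (N : List Char) (k ℓ : Nat) : Bool :=
  decide (∀ t, t < ℓ → N.getD t 'a' = N.getD (k - ℓ + t) 'a')

-- length of the longest proper border of N[:k]
def kmpFail (N : List Char) (k : Nat) : Nat :=
  Nat.findGreatest (fun ℓ => bordb N k ℓ = true) (k - 1)

theorem kmpFail_le (N : List Char) (k : Nat) : kmpFail N k ≤ k - 1 :=
  Nat.findGreatest_le _

theorem bordb_zero (N : List Char) (k : Nat) : bordb N k 0 = true := by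
  simp [bordb]

-- border transitivity: if k is a border of N (|N| = n) then for ℓ ≤ k the borders
-- of N[:k] of length ℓ are exactly the borders of N of length ℓ
theorem bordb_trans (N : List Char) (k ℓ : Nat) (hkn : k ≤ N.length) (hlk : ℓ ≤ k)
    (hk : bordb N N.length k = true) : bordb N k ℓ = bordb N N.length ℓ := by
  have hkP : ∀ u, u < k → N.getD u 'a' = N.getD (N.length - k + u) 'a' := by
    simpa [bordb, Nat.sub_sub_self hkn] using hk
  simp only [bordb, decide_eq_decide]
  constructor
  · intro h t ht
    have h2 := hkP (k - ℓ + t) (by omega)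
    have he : N.length - k + (k - ℓ + t) = N.length - ℓ + t := by omega
    rw [h t ht, h2, he]
  · intro h t ht
    have h2 := hkP (k - ℓ + t) (by omega)
    have he : N.length - k + (k - ℓ + t) = N.length - ℓ + t := by omega
    rw [h t ht, ← he, ← h2]

-- list-level border ↔ char-level border
theorem bord_char_iff (L : List Char) (ℓ : Nat) (h : ℓ ≤ L.length) :
    (L.take ℓ = L.drop (L.length - ℓ)) ↔ (∀ t, t < ℓ → L.getD t 'a' = L.getD (L.length - ℓ + t) 'a') := by
  constructor
  · intro heq t ht
    have h1 : t < L.length := by omega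
    have h2 : L.length - ℓ + t < L.length := by omega
    rw [List.getD_eq_getElem _ _ h1, List.getD_eq_getElem _ _ h2]
    have := congrArg (fun l => l[t]?) heq
    simp only [List.getElem?_take, List.getElem?_drop, ht, if_pos] at this
    have h3 : (L[t]? = L[L.length - ℓ + t]?) := this
    rw [List.getElem?_eq_getElem h1, List.getElem?_eq_getElem h2] at h3
    exact Option.some.inj h3
  · intro hc
    apply List.ext_getElem
    · simp; omega
    · intro i h1 h2
      simp only [List.getElem_take, List.getElem_drop]
      have hi : i < ℓ := by simp at h1; omega
      have := hc i hi
      rw [List.getD_eq_getElem _ _ (by omega : i < L.length),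
          List.getD_eq_getElem _ _ (by omega : L.length - ℓ + i < L.length)] at this
      exact this

-- getD after set, for Nat lists
theorem getD_set_nat (l : List Nat) (i j v : Nat) (h : i < l.length) :
    (l.set i v).getD j 0 = if i = j then v else l.getD j 0 := by
  by_cases hij : i = j
  · subst hij; simp [List.getD, h]
  · simp [List.getD, hij]

-- main invariant proof for A's first loop: on termination every pi entry below the
-- frontier holds the longest-proper-border length of the corresponding prefix
theorem pmLoop_correct (N : List Char) (pi : List Nat) (b m : Nat) :
    1 ≤ b → b + m ≤ N.length → pi.length = N.length →
    (∀ t, t < m → N.getD (b + t) 'a' = N.getD t 'a') →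
    (∀ i, i < b + m → pi.getD i 0 = kmpFail N (i + 1)) →
    (∀ i, b + m ≤ i → pi.getD i 0 = 0) →
    (∀ b', 1 ≤ b' → b' < b → ∃ j, b' ≤ j ∧ j ≤ b + m ∧ N.getD j 'a' ≠ N.getD (j - b') 'a') →
    ∀ i, i < N.length → (pmLoop N pi b m).getD i 0 = kmpFail N (i + 1) := by
  fun_induction pmLoop N pi b m with
  | case1 pi b m h heq ih =>
    intro hb hbm hlen I2 I3 I3' I4
    have heqc : N.getD (b + m) 'a' = N.getD m 'a' := by simpa using heq
    have I2' : ∀ t, t < m + 1 → N.getD (b + t) 'a' = N.getD t 'a' := by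
      intro t ht
      rcases Nat.lt_or_ge t m with h1 | h1
      · exact I2 t h1
      · have ht2 : t = m := by omega
        subst ht2; exact heqc
    have hwrite : kmpFail N (b + m + 1) = m + 1 := by
      unfold kmpFail
      rw [Nat.add_sub_cancel]
      apply Nat.findGreatest_eq_iff.mpr
      refine ⟨by omega, fun _ => ?_, ?_⟩
      · simp only [bordb, decide_eq_true_eq]
        intro t ht
        have he : b + m + 1 - (m + 1) + t = b + t := by omega
        rw [he]
        exact (I2' t ht).symm
      · intro ℓ hℓ1 hℓ2
        simp only [bordb, decide_eq_true_eq]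
        intro hP
        obtain ⟨j, hj1, hj2, hj3⟩ := I4 (b + m + 1 - ℓ) (by omega) (by omega)
        have ht : j - (b + m + 1 - ℓ) < ℓ := by omega
        have hPt := hP (j - (b + m + 1 - ℓ)) ht
        have he : b + m + 1 - ℓ + (j - (b + m + 1 - ℓ)) = j := by omega
        rw [he] at hPt
        exact hj3 hPt.symm
    refine ih hb (by omega) (by simpa using hlen) I2' ?_ ?_ ?_
    · intro i hi
      rw [getD_set_nat _ _ _ _ (by rw [hlen]; exact h)]
      by_cases hbi : b + m = i
      · subst hbi; rw [if_pos rfl]; exact hwrite.symm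
      · rw [if_neg hbi]; exact I3 i (by omega)
    · intro i hi
      rw [getD_set_nat _ _ _ _ (by rw [hlen]; exact h), if_neg (by omega)]
      exact I3' i (by omega)
    · intro b' h1 h2
      obtain ⟨j, hj1, hj2, hj3⟩ := I4 b' h1 h2
      exact ⟨j, hj1, by omega, hj3⟩
  | case2 pi b h heq ih =>
    intro hb hbm hlen I2 I3 I3' I4
    have heqc : ¬ N.getD b 'a' = N.getD 0 'a' := by simpa using heq
    have hfb : kmpFail N (b + 1) = 0 := by
      unfold kmpFail
      rw [Nat.add_sub_cancel]
      apply Nat.findGreatest_eq_zero_iff.mpr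
      intro ℓ hℓ0 hℓb
      simp only [bordb, decide_eq_true_eq]
      intro hP
      by_cases hcase : b + 1 - ℓ < b
      · obtain ⟨j, hj1, hj2, hj3⟩ := I4 (b + 1 - ℓ) (by omega) (by omega)
        have ht : j - (b + 1 - ℓ) < ℓ := by omega
        have hPt := hP _ ht
        have he : b + 1 - ℓ + (j - (b + 1 - ℓ)) = j := by omega
        rw [he] at hPt
        exact hj3 hPt.symm
      · have hl1 : ℓ = 1 := by omega
        subst hl1
        have hP0 := hP 0 (by omega)
        have he : b + 1 - 1 + 0 = b := by omega
        rw [he] at hP0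
        exact heqc hP0.symm
    refine ih (by omega) (by omega) hlen (fun t ht => absurd ht (by omega)) ?_ ?_ ?_
    · intro i hi
      rcases Nat.lt_or_ge i b with h1 | h1
      · exact I3 i (by omega)
      · have hib : i = b := by omega
        subst hib
        rw [I3' i (by omega)]
        exact hfb.symm
    · intro i hi
      exact I3' i (by omega)
    · intro b' h1 h2
      rcases Nat.lt_or_ge b' b with hc | hc
      · obtain ⟨j, hj1, hj2, hj3⟩ := I4 b' h1 hc
        exact ⟨j, hj1, by omega, hj3⟩
      · have hbb : b' = b := by omega
        subst hbb
        refine ⟨b', le_refl b', by omega, ?_⟩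
        have he : b' - b' = 0 := by omega
        rw [he]
        exact heqc
  | case3 pi b m h heq hm hp ih =>
    intro hb hbm hlen I2 I3 I3' I4
    have hpfail : pi.getD (m - 1) 0 = kmpFail N m := by
      have hi3 := I3 (m - 1) (by omega)
      rw [hi3]; congr 1; omega
    have hple : kmpFail N m ≤ m - 1 := kmpFail_le N m
    have hbord : ∀ t, t < pi.getD (m - 1) 0 →
        N.getD t 'a' = N.getD (m - pi.getD (m - 1) 0 + t) 'a' := by
      have hbb : bordb N m (kmpFail N m) = true := by
        unfold kmpFail
        exact Nat.findGreatest_spec (P := fun ℓ => bordb N m ℓ = true) (Nat.zero_le _) (bordb_zero N m)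
      rw [hpfail]
      simpa [bordb] using hbb
    have heqc : ¬ N.getD (b + m) 'a' = N.getD m 'a' := by simpa using heq
    refine ih (by omega) (by omega) hlen ?_ ?_ ?_ ?_
    · intro t ht
      have h1 : N.getD (b + (m - pi.getD (m - 1) 0 + t)) 'a'
          = N.getD (m - pi.getD (m - 1) 0 + t) 'a' := I2 _ (by omega)
      have he : b + (m - pi.getD (m - 1) 0) + t = b + (m - pi.getD (m - 1) 0 + t) := by omega
      rw [he, h1, ← hbord t ht]
    · intro i hi
      exact I3 i (by omega)
    · intro i hi
      exact I3' i (by omega)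
    · intro b'' h1 h2
      rcases Nat.lt_or_ge b'' b with hc | hc
      · obtain ⟨j, hj1, hj2, hj3⟩ := I4 b'' h1 hc
        exact ⟨j, hj1, by omega, hj3⟩
      rcases Nat.eq_or_lt_of_le hc with hc2 | hc2
      · refine ⟨b + m, by omega, by omega, ?_⟩
        have he : b + m - b'' = m := by omega
        rw [he]
        exact heqc
      · by_contra hno
        push Not at hno
        have hδ1 : 1 ≤ b'' - b := by omega
        have hδ2 : b'' - b < m - pi.getD (m - 1) 0 := by omega
        have hbordnew : bordb N m (m - (b'' - b)) = true := by
          simp only [bordb, decide_eq_true_eq]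
          intro t ht
          have he : m - (m - (b'' - b)) + t = (b'' - b) + t := by omega
          rw [he]
          have hu : (b'' - b) + t < m := by omega
          have e1 : N.getD (b + ((b'' - b) + t)) 'a' = N.getD ((b'' - b) + t) 'a' := I2 _ hu
          have e2 := hno (b + ((b'' - b) + t)) (by omega) (by omega)
          have he2 : b + ((b'' - b) + t) - b'' = t := by omega
          rw [he2] at e2
          rw [← e1, e2]
        have hng : ¬ (bordb N m (m - (b'' - b)) = true) := by
          have h1 : kmpFail N m < m - (b'' - b) := by omega
          unfold kmpFail at h1
          exact Nat.findGreatest_is_greatest h1 (by omega)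
        exact hng hbordnew
  | case4 pi b m h heq hm hp =>
    intro hb hbm hlen I2 I3 I3' I4
    exfalso
    have hi3 := I3 (m - 1) (by omega)
    have h2 := kmpFail_le N (m - 1 + 1)
    omega
  | case5 pi b m h =>
    intro hb hbm hlen I2 I3 I3' I4 i hi
    exact I3 i (by omega)

theorem pmatch_correct (s : String) :
    ∀ i, i < s.toList.length → (get_partial_match s).getD i 0 = kmpFail s.toList (i + 1) := by
  unfold get_partial_match
  rcases Nat.eq_zero_or_pos s.toList.length with h0 | hpos
  · intro i hi; rw [h0] at hi; omega
  · apply pmLoop_correct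
    · exact le_refl 1
    · omega
    · simp
    · intro t ht; omega
    · intro i hi
      have hi0 : i = 0 := by omega
      subst hi0
      have hrep : (List.replicate s.toList.length (0 : Nat)).getD 0 0 = 0 := by
        simp [List.getD]
      rw [hrep]
      simp [kmpFail]
    · intro i hi
      simp [List.getD]
    · intro b' h1 h2; omega

-- [k, k-1, …, 1]
def descR : Nat → List Nat
  | 0 => []
  | k + 1 => (k + 1) :: descR k

theorem mem_descR (k j : Nat) : j ∈ descR k ↔ 1 ≤ j ∧ j ≤ k := by
  induction k with
  | zero => simp [descR]; omega
  | succ k ih => simp [descR, ih]; omega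

theorem pyRange_descR (k : Nat) :
    PySem.List.pyRange (k : Int) 0 (-1) = (descR k).map (fun j => Int.ofNat j) := by
  induction k with
  | zero => simp [descR, PySem.List.pyRange_neg_one_eq_nil]
  | succ k ih =>
      rw [PySem.List.pyRange_neg_one_cons (by exact_mod_cast Nat.succ_pos k)]
      simp [descR, ih]

theorem descR_filter_skip (q : Nat → Bool) (p : Nat) :
    ∀ c, p ≤ c → (∀ j, p < j → j ≤ c → q j = false) →
      (descR c).filter q = (descR p).filter q := by
  intro c
  induction c with
  | zero => intro h _; simp [Nat.le_zero.mp h]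
  | succ c ihc =>
    intro hpc hq
    rcases Nat.eq_or_lt_of_le hpc with he | hlt
    · rw [he]
    · have h1 : (descR (c + 1)).filter q = (descR c).filter q := by
        simp [descR, hq (c + 1) hlt (le_refl _)]
      rw [h1, ihc (by omega) (fun j ha hb => hq j ha (by omega))]

-- A's chain loop enumerates exactly the border lengths, descending
theorem chain_eq (N : List Char) (pi : List Nat)
    (hpi : ∀ i, i < N.length → pi.getD i 0 = kmpFail N (i + 1)) :
    ∀ k, k ≤ N.length → bordb N N.length k = true →
      chainLoop pi k = ((descR k).filter
        (fun j => N.take j == N.drop (N.length - j))).map (fun j => Int.ofNat j) := by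
  intro k
  induction k using Nat.strong_induction_on with
  | _ k ih =>
    intro hk hbk
    match k with
    | 0 => rw [chainLoop]; simp [descR]
    | k' + 1 =>
      have hpval : pi.getD (k' + 1 - 1) 0 = kmpFail N (k' + 1) := by
        simpa using hpi k' (by omega)
      have hple : kmpFail N (k' + 1) ≤ k' := by
        have := kmpFail_le N (k' + 1); omega
      have hstep : chainLoop pi (k' + 1) = ((k' + 1 : Nat) : Int) :: chainLoop pi (kmpFail N (k' + 1)) := by
        rw [chainLoop]
        rw [if_pos (by omega : k' + 1 > 0), hpval, dif_pos (by omega : kmpFail N (k' + 1) < k' + 1)]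
      have qk : (N.take (k' + 1) == N.drop (N.length - (k' + 1))) = true := by
        rw [beq_iff_eq]
        exact (bord_char_iff N (k' + 1) hk).mpr (by simpa [bordb] using hbk)
      have qfalse : ∀ j, kmpFail N (k' + 1) < j → j ≤ k' →
          (N.take j == N.drop (N.length - j)) = false := by
        intro j h1 h2
        rw [beq_eq_false_iff_ne]
        intro heq
        have hbnj : bordb N N.length j = true := by
          simp only [bordb, decide_eq_true_eq]
          exact (bord_char_iff N j (by omega)).mp heq
        have hbkj : bordb N (k' + 1) j = true := by
          rw [bordb_trans N (k' + 1) j hk (by omega) hbk]; exact hbnj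
        exact Nat.findGreatest_is_greatest h1 (by omega) hbkj
      have bp : bordb N N.length (kmpFail N (k' + 1)) = true := by
        have hkp : bordb N (k' + 1) (kmpFail N (k' + 1)) = true := by
          unfold kmpFail
          exact Nat.findGreatest_spec (P := fun ℓ => bordb N (k' + 1) ℓ = true) (Nat.zero_le _) (bordb_zero N (k' + 1))
        rw [← bordb_trans N (k' + 1) (kmpFail N (k' + 1)) hk (by omega) hbk]
        exact hkp
      have hskip : (descR k').filter (fun j => N.take j == N.drop (N.length - j)) =
          (descR (kmpFail N (k' + 1))).filter (fun j => N.take j == N.drop (N.length - j)) :=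
        descR_filter_skip _ _ k' (by omega) qfalse
      rw [hstep, ih (kmpFail N (k' + 1)) (by omega) (by omega) bp]
      simp only [descR, List.filter_cons, qk, if_pos, hskip]
      simp

-- ===== VERDICT (by name: the statement is the Claim_ definition above) =====
theorem get_prefix_suffix_spec : Claim_equal_get_prefix_suffix := by
  intro s _
  show get_prefix_suffix s = get_prefix_suffix_alt s
  unfold get_prefix_suffix get_prefix_suffix_alt
  rw [chain_eq s.toList (get_partial_match s) (pmatch_correct s) s.toList.length (le_refl _)
      (by simp [bordb])]
  rw [pyRange_descR, List.filter_map]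
  congr 1
  apply List.filter_congr
  intro j hj
  have hjb := (mem_descR _ j).mp hj
  simp only [Function.comp]
  rw [Int.ofNat_eq_natCast, PySem.List.slice_to_natCast, PySem.List.slice_from_neg_natCast _ _ hjb.1]
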